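-- pv_equiv track=rewrite | github.com/ChandaSukesh/Competitive-Programming | 03-recursion_onlyevendigits-Python/recursion_onlyevendigits.py | evenFn
-- ===== SOURCE A (Python) =====
-- def evenFn(n, val=0):
-- 	if n == 0:
-- 		return val
-- 	else:
-- 		if (n % 10) % 2 == 0:
-- 			m=n//10
-- 			ans=(val * 10) + (n % 10)
-- 			return evenFn(m,ans)
-- 		else:
-- 			m=n//10
-- 			return evenFn(m, val)
-- ===== SOURCE B (Python) =====
-- def evenFn(n, val=0):
--     while n > 0:
--         d = n % 10
--         if d % 2 == 0:
--             val = val * 10 + d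
--         n //= 10
--     return val
-- ===== Notes on version B (the rewrite author's own statement) =====
-- stated objective: idiomatic
-- what changed: Replaces the tail recursion with an iterative while-loop threading the same accumulator.
import Mathlib
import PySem

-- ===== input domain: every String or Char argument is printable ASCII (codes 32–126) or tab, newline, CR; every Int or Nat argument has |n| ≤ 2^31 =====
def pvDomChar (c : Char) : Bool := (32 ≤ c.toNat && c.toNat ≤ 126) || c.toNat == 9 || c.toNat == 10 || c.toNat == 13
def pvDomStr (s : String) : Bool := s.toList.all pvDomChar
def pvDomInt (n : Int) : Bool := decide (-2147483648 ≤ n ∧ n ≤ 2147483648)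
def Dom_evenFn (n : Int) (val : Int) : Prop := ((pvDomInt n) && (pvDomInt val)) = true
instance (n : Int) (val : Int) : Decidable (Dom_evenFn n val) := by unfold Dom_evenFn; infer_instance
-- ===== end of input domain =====

-- B replaces A's tail recursion with an iterative while-loop threading the same accumulator (idiomatic).
-- Pre_ excludes n < 0: there A's recursion never reaches 0 (n//10 stays negative) and raises RecursionError.


-- ===== PORT A =====
-- fuel only makes the recursion total; with fuel > n ≥ 0 it is never exhausted (A diverges for n < 0)
def evenFnAux : Nat → Int → Int → Int
  | 0, _, val => val
  | fuel + 1, n, val =>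
    if n = 0 then val
    else
      if PySem.Int.mod (PySem.Int.mod n 10) 2 = 0 then
        evenFnAux fuel (PySem.Int.floordiv n 10) (val * 10 + PySem.Int.mod n 10)
      else
        evenFnAux fuel (PySem.Int.floordiv n 10) val

def evenFn (n : Int) (val : Int) : Int := evenFnAux (n.natAbs + 1) n val

-- ===== PORT B =====
-- termination helper for the while-loop recursion (cited by decreasing_by)
theorem pv_fdiv10_toNat_lt (n : Int) (h : 0 < n) :
    (PySem.Int.floordiv n 10).toNat < n.toNat := by
  rw [PySem.Int.floordiv_eq_ediv_of_pos (by norm_num)]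
  have hq := Int.ediv_add_emod n 10
  have hr1 := Int.emod_nonneg n (by norm_num : (10 : Int) ≠ 0)
  have hr2 := Int.emod_lt_of_pos n (by norm_num : (0 : Int) < 10)
  omega

-- while n > 0: d = n % 10; if d % 2 == 0: val = val*10 + d; n //= 10
def evenFn_alt (n : Int) (val : Int) : Int :=
  if h : 0 < n then
    let d := PySem.Int.mod n 10
    evenFn_alt (PySem.Int.floordiv n 10)
      (if PySem.Int.mod d 2 = 0 then val * 10 + d else val)
  else val
termination_by n.toNat
decreasing_by exact pv_fdiv10_toNat_lt n h

-- ===== PRECONDITION & SPEC =====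
-- Pre_ excludes n < 0, where A raises RecursionError (n//10 never reaches 0)
def Pre_evenFn (n : Int) (val : Int) : Prop := 0 ≤ n
instance (n : Int) (val : Int) : Decidable (Pre_evenFn n val) := by unfold Pre_evenFn; infer_instance
def pvWitness_evenFn : Int × Int := (2468, 0)

def Spec_evenFn (n : Int) (val : Int) (out : Int) : Prop := out = evenFn_alt n val
instance (n : Int) (val : Int) (out : Int) : Decidable (Spec_evenFn n val out) := by unfold Spec_evenFn; infer_instance

-- ===== CLAIM (what is proved, stated in full; the proofs are below) =====
def Claim_equal_evenFn : Prop := ∀ (n : Int) (val : Int), Dom_evenFn n val → Pre_evenFn n val → Spec_evenFn n val (evenFn n val)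

-- ===== LEMMAS AND PROOFS =====
theorem evenFnAux_eq_alt (fuel : Nat) :
    ∀ (n val : Int), 0 ≤ n → n.toNat < fuel → evenFnAux fuel n val = evenFn_alt n val := by
  induction fuel with
  | zero => intro n val _ h; omega
  | succ k ih =>
    intro n val hn hfuel
    by_cases h0 : n = 0
    · subst h0
      simp [evenFnAux, evenFn_alt]
    · have hpos : 0 < n := lt_of_le_of_ne hn (Ne.symm h0)
      have hdiv : PySem.Int.floordiv n 10 = n / 10 :=
        PySem.Int.floordiv_eq_ediv_of_pos (by norm_num)
      have hq := Int.ediv_add_emod n 10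
      have hr1 := Int.emod_nonneg n (by norm_num : (10 : Int) ≠ 0)
      have hr2 := Int.emod_lt_of_pos n (by norm_num : (0 : Int) < 10)
      rw [evenFn_alt, dif_pos hpos]
      simp only [evenFnAux, if_neg h0]
      by_cases hc : PySem.Int.mod (PySem.Int.mod n 10) 2 = 0
      · rw [if_pos hc, if_pos hc, ih _ _ (by omega) (by omega)]
      · rw [if_neg hc, if_neg hc, ih _ _ (by omega) (by omega)]

-- ===== VERDICT (by name: the statement is the Claim_ definition above) =====
theorem evenFn_spec : Claim_equal_evenFn := by
  intro n val _ hpre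
  unfold Spec_evenFn evenFn
  exact evenFnAux_eq_alt (n.natAbs + 1) n val hpre (by omega)
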